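-- pv_equiv track=rewrite | github.com/mgreen27/DetectRaptor | scripts/base_functions_yara.py | order_rules
-- ===== SOURCE A (Python) =====
-- def order_rules(original_rules,rules):
--     matching_rules = []
--     seen_rule_names = set()
--
--     for orig_rule in original_rules:
--         orig_name = orig_rule.get('rule_name', '').lower()
--
--         for rule in rules:
--             rule_name = rule.get('rule_name', '').lower()
--             if rule_name == orig_name:
--                 if rule_name not in seen_rule_names:
--                     seen_rule_names.add(rule_name)
--                     matching_rules.append(rule)
--                 break
--
--     return matching_rules
-- ===== SOURCE B (Python) =====
-- def order_rules(original_rules, rules):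
--     # Position of each original rule name (first occurrence, lowercased).
--     order = {}
--     for orig_rule in original_rules:
--         name = orig_rule.get('rule_name', '').lower()
--         if name not in order:
--             order[name] = len(order)
--     # One pass over `rules`: keep the first rule per name that original_rules asks for.
--     kept = {}
--     for rule in rules:
--         name = rule.get('rule_name', '').lower()
--         if name in order and name not in kept:
--             kept[name] = rule
--     # Emit the kept rules in original_rules' name order.
--     return [kept[name] for name in sorted(kept, key=lambda n: order[n])]
-- ===== Notes on version B (the rewrite author's own statement) =====
-- stated objective: alternative
-- what changed: A rescans the whole rules list once per original rule with a seen-set; B builds a name-to-position index over original_rules and a name-to-first-rule dict in one pass over rules, then sorts the kept names by original position.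
import Mathlib
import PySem

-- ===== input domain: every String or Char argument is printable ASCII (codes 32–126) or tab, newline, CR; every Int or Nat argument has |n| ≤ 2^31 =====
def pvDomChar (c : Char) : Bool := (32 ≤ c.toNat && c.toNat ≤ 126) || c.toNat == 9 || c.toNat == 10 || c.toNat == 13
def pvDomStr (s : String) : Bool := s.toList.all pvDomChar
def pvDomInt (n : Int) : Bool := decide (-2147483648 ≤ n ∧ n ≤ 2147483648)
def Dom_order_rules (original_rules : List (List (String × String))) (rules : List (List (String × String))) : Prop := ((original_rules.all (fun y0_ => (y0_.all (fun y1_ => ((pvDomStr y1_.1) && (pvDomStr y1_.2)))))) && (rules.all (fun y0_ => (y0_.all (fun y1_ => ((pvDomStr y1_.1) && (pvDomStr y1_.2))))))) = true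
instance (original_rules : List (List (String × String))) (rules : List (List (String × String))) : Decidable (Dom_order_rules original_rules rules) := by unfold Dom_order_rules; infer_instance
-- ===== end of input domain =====

-- B replaces A's rescan of `rules` per original rule by one index pass over each list
-- plus a sort of the kept names by their original position (objective: alternative).

-- rule.get('rule_name', '').lower() — shared by both sources
def pvRuleName (r : List (String × String)) : String :=
  PySem.Str.lower ((PySem.Dict.mk r).getD "rule_name" "")

-- ===== PORT A =====
-- inner `for rule in rules: … break` loop of A
def pvInner (nm : String) (rs : List (List (String × String)))
    (st : List (List (String × String)) × PySem.Set String) :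
    List (List (String × String)) × PySem.Set String :=
  match rs with
  | [] => st
  | r :: t =>
    let rn := pvRuleName r
    if rn == nm then
      if PySem.Set.contains st.2 rn then st
      else (st.1 ++ [r], PySem.Set.add st.2 rn)
    else pvInner nm t st

def order_rules (original_rules : List (List (String × String))) (rules : List (List (String × String))) : List (List (String × String)) :=
  (original_rules.foldl (fun st orig_rule => pvInner (pvRuleName orig_rule) rules st)
    ([], PySem.Set.empty)).1

-- ===== PORT B =====
-- first loop of B: name -> first-occurrence position among original_rules' names
def pvOrderDict (original_rules : List (List (String × String))) : PySem.Dict String Int :=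
  original_rules.foldl (fun d orig_rule =>
    let n := pvRuleName orig_rule
    if d.contains n then d else d.insert n (d.size : Int)) PySem.Dict.empty

-- second loop of B: name -> first rule in `rules` carrying a wanted name
def pvKeptDict (order : PySem.Dict String Int) (rules : List (List (String × String))) :
    PySem.Dict String (List (String × String)) :=
  rules.foldl (fun d rule =>
    let n := pvRuleName rule
    if order.contains n && !(d.contains n) then d.insert n rule else d) PySem.Dict.empty

def order_rules_alt (original_rules : List (List (String × String))) (rules : List (List (String × String))) : List (List (String × String)) :=
  let order := pvOrderDict original_rules
  let kept := pvKeptDict order rules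
  -- [kept[n] for n in sorted(kept, key=lambda n: order[n])]; every n in kept is in order, so order[n] = order.getD n 0
  (PySem.List.sorted kept.keys (fun n => order.getD n 0)).map (fun n => kept.getD n [])

-- ===== PRECONDITION & SPEC =====
def Spec_order_rules (original_rules : List (List (String × String))) (rules : List (List (String × String))) (out : List (List (String × String))) : Prop := out = order_rules_alt original_rules rules
instance (original_rules : List (List (String × String))) (rules : List (List (String × String))) (out : List (List (String × String))) : Decidable (Spec_order_rules original_rules rules out) := by unfold Spec_order_rules; infer_instance

-- ===== CLAIM (what is proved, stated in full; the proofs are below) =====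
def Claim_equal_order_rules : Prop := ∀ (original_rules : List (List (String × String))) (rules : List (List (String × String))), Dom_order_rules original_rules rules → Spec_order_rules original_rules rules (order_rules original_rules rules)

-- ===== LEMMAS AND PROOFS =====

-- the name A's nested loop emits a rule for, in order: proof-side reference
def pvSel (rules : List (List (String × String))) : List String → PySem.Set String → List String
  | [], _ => []
  | n :: t, seen =>
    if (rules.find? (fun r => pvRuleName r == n)).isSome && !(PySem.Set.contains seen n) then
      n :: pvSel rules t (PySem.Set.add seen n)
    else pvSel rules t seen

def pvEmit (rules : List (List (String × String))) (n : String) : List (String × String) :=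
  (rules.find? (fun r => pvRuleName r == n)).getD []

theorem pvInner_eq_find (nm : String) (rs : List (List (String × String)))
    (st : List (List (String × String)) × PySem.Set String) :
    pvInner nm rs st =
      match rs.find? (fun r => pvRuleName r == nm) with
      | none => st
      | some r => if PySem.Set.contains st.2 nm then st else (st.1 ++ [r], PySem.Set.add st.2 nm) := by
  induction rs with
  | nil => rfl
  | cons r t ih =>
    by_cases h : (pvRuleName r == nm) = true
    · have he : pvRuleName r = nm := eq_of_beq h
      simp [pvInner, he]
    · have h' : (pvRuleName r == nm) = false := by simpa using h
      simp only [List.find?_cons, h']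
      simp [pvInner, h', ih]

theorem pvFoldA (rules : List (List (String × String))) (os : List (List (String × String)))
    (acc : List (List (String × String))) (seen : PySem.Set String) :
    (os.foldl (fun st orig_rule => pvInner (pvRuleName orig_rule) rules st) (acc, seen)).1 =
      acc ++ (pvSel rules (os.map pvRuleName) seen).map (pvEmit rules) := by
  induction os generalizing acc seen with
  | nil => simp [pvSel]
  | cons o t ih =>
    rw [List.foldl_cons, pvInner_eq_find]
    rcases hf : (rules.find? (fun r => pvRuleName r == (pvRuleName o))) with _ | r
    · rw [ih acc seen]
      simp [pvSel, hf]
    · by_cases hc : PySem.Set.contains seen (pvRuleName o) = true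
      · simp only [if_pos hc]
        rw [ih acc seen]
        simp only [List.map_cons, pvSel, hf, Option.isSome_some, hc, Bool.not_true, Bool.and_false]
        rw [if_neg (by simp)]
      · have hc' : PySem.Set.contains seen (pvRuleName o) = false := by simpa using hc
        simp only [hc', Bool.false_eq_true, if_false]
        rw [ih (acc ++ [r]) (PySem.Set.add seen (pvRuleName o))]
        simp only [List.map_cons, pvSel, hf, Option.isSome_some, hc', Bool.not_false, Bool.and_true]
        simp [pvEmit, hf]

theorem pvFilter_discard (p : String → Bool) (l : List String) (n : String) (hp : p n = false) :
    List.filter p (PySem.Set.discard l n) = List.filter p l := by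
  show List.filter p (List.filter (fun y => !(y == n)) l) = _
  rw [List.filter_filter]
  refine List.filter_congr ?_
  intro m _
  by_cases hm : m = n
  · subst hm; simp [hp]
  · simp [hm]

theorem pvSel_eq_filter (rules : List (List (String × String))) (ns : List String)
    (seen : PySem.Set String) :
    pvSel rules ns seen =
      (PySem.Set.ofList ns).filter
        (fun n => (rules.find? (fun r => pvRuleName r == n)).isSome
                  && !(PySem.Set.contains seen n)) := by
  induction ns generalizing seen with
  | nil => rfl
  | cons n t ih =>
    rw [PySem.Set.ofList_cons]
    by_cases hm : (rules.find? (fun r => pvRuleName r == n)).isSome = true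
    · by_cases hc : PySem.Set.contains seen n = true
      · -- skipped: already seen
        have hmem : n ∈ seen := (PySem.Set.contains_iff seen n).mp hc
        rw [List.filter_cons_of_neg (by simp [hm, hmem])]
        have h1 : pvSel rules (n :: t) seen = pvSel rules t seen := by
          simp [pvSel, hm, hmem]
        rw [h1, ih seen, pvFilter_discard _ _ _ (by simp [hm, hmem])]
      · -- emitted
        have hc' : PySem.Set.contains seen n = false := by simpa using hc
        have hnmem : n ∉ seen := by simpa [PySem.Set.contains_iff] using hc
        rw [List.filter_cons_of_pos (by simp [hm, hnmem])]
        have h1 : pvSel rules (n :: t) seen = n :: pvSel rules t (PySem.Set.add seen n) := by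
          simp [pvSel, hm, hnmem]
        rw [h1, ih (PySem.Set.add seen n)]
        have hadd : PySem.Set.add seen n = seen ++ [n] :=
          PySem.Set.add_of_not_mem (by simpa [PySem.Set.contains_iff] using hc)
        congr 1
        show _ = List.filter _ (List.filter (fun y => !(y == n)) (PySem.Set.ofList t))
        rw [List.filter_filter]
        refine List.filter_congr ?_
        intro m _
        rw [hadd]
        by_cases hmn : m = n
        · subst hmn; simp
        · simp [hmn]
    · -- no matching rule for n
      have hm' : (rules.find? (fun r => pvRuleName r == n)).isSome = false := by simpa using hm
      rw [List.filter_cons_of_neg (by simp [hm'])]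
      have h1 : pvSel rules (n :: t) seen = pvSel rules t seen := by
        simp [pvSel, hm']
      rw [h1, ih seen, pvFilter_discard _ _ _ (by simp [hm'])]

-- order dict: its keys are the deduped original names
theorem pvOrder_keys_aux (os : List (List (String × String))) (d : PySem.Dict String Int) :
    (os.foldl (fun d orig_rule =>
      let n := pvRuleName orig_rule
      if d.contains n then d else d.insert n (d.size : Int)) d).keys =
      PySem.Set.update d.keys (os.map pvRuleName) := by
  induction os generalizing d with
  | nil => simp [PySem.Set.update_nil]
  | cons o t ih =>
    rw [List.map_cons, PySem.Set.update_cons, List.foldl_cons]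
    by_cases hc : d.contains (pvRuleName o) = true
    · rw [PySem.Set.add_of_mem ((PySem.Dict.contains_iff_mem_keys d _).mp hc)]
      simp only [hc, if_true]
      exact ih d
    · have hnm : pvRuleName o ∉ d.keys := by
        intro h; exact absurd ((PySem.Dict.contains_iff_mem_keys d _).mpr h) hc
      have hc' : d.contains (pvRuleName o) = false := by simpa using hc
      rw [PySem.Set.add_of_not_mem hnm]
      simp only [hc', Bool.false_eq_true, if_false]
      rw [ih, PySem.Dict.keys_insert_of_not_contains d _ hc']

theorem pvOrder_keys (os : List (List (String × String))) :
    (pvOrderDict os).keys = PySem.Set.ofList (os.map pvRuleName) := by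
  rw [pvOrderDict, pvOrder_keys_aux]
  show PySem.Set.update ([] : List String) _ = _
  exact PySem.Set.update_nil_left _

-- order dict: stored positions strictly increase along the items list
def pvInc (d : PySem.Dict String Int) : Prop :=
  d.items.Pairwise (fun p q => p.2 < q.2) ∧ ∀ p ∈ d.items, p.2 < (d.size : Int)

theorem pvOrder_inc_aux (os : List (List (String × String))) (d : PySem.Dict String Int)
    (hd : pvInc d) :
    pvInc (os.foldl (fun d orig_rule =>
      let n := pvRuleName orig_rule
      if d.contains n then d else d.insert n (d.size : Int)) d) := by
  induction os generalizing d with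
  | nil => exact hd
  | cons o t ih =>
    rw [List.foldl_cons]
    by_cases hc : d.contains (pvRuleName o) = true
    · simp only [hc, if_true]; exact ih d hd
    · simp only [Bool.not_eq_true] at hc
      rw [if_neg (by simp [hc])]
      refine ih _ ?_
      obtain ⟨hpw, hbd⟩ := hd
      constructor
      · rw [PySem.Dict.items_insert_of_not_contains d _ hc, List.pairwise_append]
        exact ⟨hpw, by simp, fun p hp b hb => by
          simp only [List.mem_singleton] at hb
          subst hb
          exact hbd p hp⟩
      · intro p hp
        rw [PySem.Dict.items_insert_of_not_contains d _ hc] at hp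
        have hs : (d.insert (pvRuleName o) (d.size : Int)).size = d.size + 1 := by
          rw [PySem.Dict.size_insert, if_neg (by simp [hc])]
        rw [hs]
        rcases List.mem_append.mp hp with h | h
        · have := hbd p h; push_cast; omega
        · simp only [List.mem_singleton] at h
          subst h; push_cast; omega

theorem pvOrder_keys_pairwise (os : List (List (String × String))) :
    (pvOrderDict os).keys.Pairwise
      (fun a b => (pvOrderDict os).getD a 0 < (pvOrderDict os).getD b 0) := by
  have hinc : pvInc (pvOrderDict os) :=
    pvOrder_inc_aux os PySem.Dict.empty (by constructor <;> simp [PySem.Dict.empty])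
  have hnd : (pvOrderDict os).keys.Nodup := by
    rw [pvOrder_keys]; exact PySem.Set.nodup_ofList _
  show ((pvOrderDict os).items.map Prod.fst).Pairwise _
  rw [List.pairwise_map]
  refine hinc.1.imp_of_mem ?_
  intro p q hp hq hlt
  have h1 : (pvOrderDict os).getD p.1 0 = p.2 :=
    PySem.Dict.getD_of_mem_items (pvOrderDict os) (by simpa using hp) hnd 0
  have h2 : (pvOrderDict os).getD q.1 0 = q.2 :=
    PySem.Dict.getD_of_mem_items (pvOrderDict os) (by simpa using hq) hnd 0
  rw [h1, h2]; exact hlt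

-- kept dict: lookup characterisation
theorem pvKept_get?_aux (od : PySem.Dict String Int) (rs : List (List (String × String)))
    (d : PySem.Dict String (List (String × String))) (n : String) :
    (rs.foldl (fun d rule =>
      let m := pvRuleName rule
      if od.contains m && !(d.contains m) then d.insert m rule else d) d).get? n =
      match d.get? n with
      | some v => some v
      | none => if od.contains n then rs.find? (fun r => pvRuleName r == n) else none := by
  induction rs generalizing d with
  | nil => rcases h : d.get? n with _ | v <;> simp [h]
  | cons r t ih =>
    rw [List.foldl_cons]
    by_cases hstep : (od.contains (pvRuleName r) && !(d.contains (pvRuleName r))) = true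
    · rw [if_pos (by exact hstep), ih]
      have hoc : od.contains (pvRuleName r) = true := (Bool.and_eq_true _ _ |>.mp hstep).1
      have hdc : d.contains (pvRuleName r) = false := by
        have := (Bool.and_eq_true _ _ |>.mp hstep).2; simpa using this
      by_cases hn : n = pvRuleName r
      · subst hn
        rw [PySem.Dict.get?_insert_self]
        have hnone : d.get? (pvRuleName r) = none :=
          (PySem.Dict.get?_eq_none_iff_contains d _).mpr hdc
        rw [hnone]
        simp [hoc]
      · have hpred : (pvRuleName r == n) = false := by
          rw [beq_eq_false_iff_ne]; exact fun h => hn h.symm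
        rw [PySem.Dict.get?_insert_of_ne d _ hn]
        simp [hpred]
    · rw [if_neg hstep, ih]
      by_cases hn : n = pvRuleName r
      · subst hn
        rcases hd : d.get? (pvRuleName r) with _ | v
        · have hdc : d.contains (pvRuleName r) = false :=
            (PySem.Dict.get?_eq_none_iff_contains d _).mp hd
          have hoc : od.contains (pvRuleName r) = false := by
            rcases Bool.eq_false_or_eq_true (od.contains (pvRuleName r)) with h | h
            · exact absurd (by simp [h, hdc]) hstep
            · exact h
          simp [hoc]
        · simp
      · have hpred : (pvRuleName r == n) = false := by
          rw [beq_eq_false_iff_ne]; exact fun h => hn h.symm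
        simp [hpred]

theorem pvKept_get? (od : PySem.Dict String Int) (rs : List (List (String × String))) (n : String) :
    (pvKeptDict od rs).get? n =
      if od.contains n then rs.find? (fun r => pvRuleName r == n) else none := by
  rw [pvKeptDict, pvKept_get?_aux]
  simp [PySem.Dict.get?_empty]

theorem pvKept_keys_nodup_aux (od : PySem.Dict String Int) (rs : List (List (String × String)))
    (d : PySem.Dict String (List (String × String))) (hd : d.keys.Nodup) :
    (rs.foldl (fun d rule =>
      let m := pvRuleName rule
      if od.contains m && !(d.contains m) then d.insert m rule else d) d).keys.Nodup := by
  induction rs generalizing d with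
  | nil => exact hd
  | cons r t ih =>
    rw [List.foldl_cons]
    by_cases hstep : (od.contains (pvRuleName r) && !(d.contains (pvRuleName r))) = true
    · rw [if_pos (by exact hstep)]
      refine ih _ ?_
      have hdc : d.contains (pvRuleName r) = false := by
        have := (Bool.and_eq_true _ _ |>.mp hstep).2; simpa using this
      rw [PySem.Dict.keys_insert_of_not_contains d _ hdc]
      have hnm : pvRuleName r ∉ d.keys := fun h =>
        absurd ((PySem.Dict.contains_iff_mem_keys d _).mpr h) (by simp [hdc])
      simp [List.nodup_append, hd]
      intro a ha h
      exact hnm (h ▸ ha)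
    · rw [if_neg hstep]; exact ih d hd

theorem pvKept_keys_nodup (od : PySem.Dict String Int) (rs : List (List (String × String))) :
    (pvKeptDict od rs).keys.Nodup := by
  exact pvKept_keys_nodup_aux od rs PySem.Dict.empty (by simp [PySem.Dict.empty, PySem.Dict.keys])

theorem order_rules_eq_alt (original_rules rules : List (List (String × String))) :
    order_rules original_rules rules = order_rules_alt original_rules rules := by
  have hA : order_rules original_rules rules =
      (pvSel rules (original_rules.map pvRuleName) PySem.Set.empty).map (pvEmit rules) := by
    rw [order_rules, pvFoldA]; rfl
  set ns := original_rules.map pvRuleName with hns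
  set od := pvOrderDict original_rules with hod
  set kd := pvKeptDict od rules with hkd
  have hkeys : od.keys = PySem.Set.ofList ns := pvOrder_keys original_rules
  -- the list of names B keeps, in original order
  set L := (PySem.Set.ofList ns).filter (fun n => kd.contains n) with hL
  have hLnodup : L.Nodup := (PySem.Set.nodup_ofList ns).filter _
  have hcontains_mem : ∀ n, kd.contains n = true → n ∈ PySem.Set.ofList ns := by
    intro n h
    rw [PySem.Dict.contains_eq_isSome_get?, pvKept_get?] at h
    by_cases hoc : od.contains n = true
    · exact hkeys ▸ (PySem.Dict.contains_iff_mem_keys od n).mp hoc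
    · rw [if_neg hoc] at h; simp at h
  have hsorted : PySem.List.sorted kd.keys (fun n => od.getD n 0) = L := by
    refine PySem.List.sorted_eq_of_perm_of_pairwise_lt _ _ _ ?_ ?_
    · rw [List.perm_ext_iff_of_nodup hLnodup (pvKept_keys_nodup od rules)]
      intro n
      rw [hL, List.mem_filter, ← PySem.Dict.contains_iff_mem_keys kd n]
      constructor
      · rintro ⟨_, h⟩; exact h
      · intro h; exact ⟨hcontains_mem n h, h⟩
    · rw [hL, ← hkeys]
      exact (pvOrder_keys_pairwise original_rules).filter _
  have hB : order_rules_alt original_rules rules = L.map (fun n => kd.getD n []) := by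
    rw [order_rules_alt]
    simp only [← hod, ← hkd, hsorted]
  rw [hA, hB]
  -- the two name lists coincide …
  have hoc_of_mem : ∀ n ∈ PySem.Set.ofList ns, od.contains n = true := by
    intro n hn
    exact (PySem.Dict.contains_iff_mem_keys od n).mpr (hkeys ▸ hn)
  have hnames : pvSel rules ns PySem.Set.empty = L := by
    rw [pvSel_eq_filter, hL]
    refine List.filter_congr ?_
    intro n hn
    rw [PySem.Dict.contains_eq_isSome_get?, pvKept_get?, if_pos (hoc_of_mem n hn)]
    simp [PySem.Set.empty_eq]
  rw [hnames]
  -- … and so do the emitted rules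
  refine List.map_congr_left ?_
  intro n hn
  have hmem : n ∈ PySem.Set.ofList ns := (List.mem_filter.mp (hL ▸ hn)).1
  rw [PySem.Dict.getD_eq_get?_getD, pvKept_get?, if_pos (hoc_of_mem n hmem)]
  rfl

-- ===== VERDICT (by name: the statement is the Claim_ definition above) =====
theorem order_rules_spec : Claim_equal_order_rules := by
  intro original_rules rules _
  unfold Spec_order_rules
  exact order_rules_eq_alt original_rules rules
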